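-- pv_equiv track=rewrite | github.com/Elvis280/doc-analysis | Clean.py | detect_table_signals
-- ===== SOURCE A (Python) =====
-- def detect_table_signals(table):
--     rows = table.get("rows", [])
--     if not rows:
--         return {}
--
--     lengths = [len(r) for r in rows]
--     unique_lengths = set(lengths)
--
--     # Check for repeated header-like rows (heuristic: first row repeats exactly)
--     repeated_header = False
--     if len(rows) > 5:
--         first_row_str = str(rows[0])
--         for r in rows[5:]: # Check further down
--             if str(r) == first_row_str:
--                 repeated_header = True
--                 break
--
--     return {
--         "possible_header_row": True, # Process always passes header as first row currently
--         "repeated_header_detected": repeated_header,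
--         "merged_cells_likely": any(c is None or c == "" for r in rows for c in r), # Crude heuristic
--         "row_length_variance": len(unique_lengths) > 1
--     }
-- ===== SOURCE B (Python) =====
-- def detect_table_signals(table):
--     rows = table.get("rows", [])
--     if not rows:
--         return {}
--
--     first_len = len(rows[0])
--     first_str = str(rows[0])
--     check_header = len(rows) > 5
--
--     length_varies = False
--     has_empty = False
--     repeated = False
--     for i, r in enumerate(rows):
--         if len(r) != first_len:
--             length_varies = True
--         if any(c is None or c == "" for c in r):
--             has_empty = True
--         if check_header and i >= 5 and str(r) == first_str:
--             repeated = True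
--
--     return {
--         "possible_header_row": True,
--         "repeated_header_detected": repeated,
--         "merged_cells_likely": has_empty,
--         "row_length_variance": length_varies,
--     }
-- ===== Notes on version B (the rewrite author's own statement) =====
-- stated objective: alternative
-- what changed: Replaces A's four separate passes (length list + set, a dedicated rows[5:] scan with break, and a flattened any-comprehension) with one indexed loop over rows maintaining three interacting flags (length_varies vs len(rows[0]), has_empty, repeated for index >= 5 when len(rows) > 5).
import Mathlib
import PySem

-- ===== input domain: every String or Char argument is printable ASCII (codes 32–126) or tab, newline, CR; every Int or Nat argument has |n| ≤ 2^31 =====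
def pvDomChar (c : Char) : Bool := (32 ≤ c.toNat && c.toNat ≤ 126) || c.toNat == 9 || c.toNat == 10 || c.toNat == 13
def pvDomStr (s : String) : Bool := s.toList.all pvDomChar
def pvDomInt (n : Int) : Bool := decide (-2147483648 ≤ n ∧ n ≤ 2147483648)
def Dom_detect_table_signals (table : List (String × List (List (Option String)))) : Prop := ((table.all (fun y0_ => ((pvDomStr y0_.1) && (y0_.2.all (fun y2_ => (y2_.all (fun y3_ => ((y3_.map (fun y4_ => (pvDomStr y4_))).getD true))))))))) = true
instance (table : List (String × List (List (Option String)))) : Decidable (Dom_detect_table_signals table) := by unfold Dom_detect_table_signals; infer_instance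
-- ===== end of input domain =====

-- B fuses A's four separate passes (length list + set, rows[5:] scan, flattened any) into one indexed
-- loop over rows maintaining three flags; same cost, different decomposition ("alternative").

-- Shared model of Python's str() on a row (list of Optional[str]), exact on the ASCII domain
-- (printable + tab/newline/CR): repr escapes \\, the chosen quote, \t, \n, \r; Python picks '"'
-- iff the string contains "'" and not '"'. Both Pythons call str(), so both ports use this helper.
-- str-equality is modelled as equality of the List Char renderings (String.mk is injective, so exact).
def pyReprStrChars (cs : List Char) : List Char :=
  let q : Char := if cs.contains '\'' && !(cs.contains '"') then '"' else '\''
  q :: cs.flatMap (fun c =>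
    if c = '\\' then ['\\', '\\']
    else if c = q then ['\\', q]
    else if c = '\t' then ['\\', 't']
    else if c = '\n' then ['\\', 'n']
    else if c = '\r' then ['\\', 'r']
    else [c]) ++ [q]

def pyReprCell : Option String → List Char
  | none => ['N', 'o', 'n', 'e']
  | some s => pyReprStrChars s.toList

def pyReprRow (r : List (Option String)) : List Char :=
  '[' :: (List.intercalate [',', ' '] (r.map pyReprCell)) ++ [']']

-- Python's `c is None or c == ""`
def cellEmpty (c : Option String) : Bool := c == none || c == some ""

-- ===== PORT A =====
-- A's `for r in rows[5:]: if str(r) == first_row_str: repeated_header = True; break`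
def aFindRepeated (fs : List Char) : List (List (Option String)) → Bool
  | [] => false
  | r :: rs => if pyReprRow r == fs then true else aFindRepeated fs rs

def detect_table_signals (table : List (String × List (List (Option String)))) : List (String × Bool) :=
  let rows := PySem.Dict.getD (PySem.Dict.mk table) "rows" []
  match rows with
  | [] => []        -- `if not rows:` early return of the empty dict
  | r0 :: rs =>
    let lengths := (r0 :: rs).map (fun r => (r.length : Int))
    let unique_lengths := PySem.Set.ofList lengths
    let repeated_header :=
      if (r0 :: rs).length > 5 then
        let first_row_str := pyReprRow r0          -- rows[0], nonempty here
        aFindRepeated first_row_str ((r0 :: rs).drop 5)   -- rows[5:] (drop is exact: start ≥ 0)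
      else false
    [("possible_header_row", true),
     ("repeated_header_detected", repeated_header),
     ("merged_cells_likely", (r0 :: rs).any (fun r => r.any cellEmpty)),
     ("row_length_variance", decide (unique_lengths.length > 1))]

-- ===== PORT B =====
-- B's single `for i, r in enumerate(rows)` loop with three flag accumulators
def bLoop (firstLen : Nat) (fs : List Char) (check : Bool) :
    List (List (Option String)) → Nat → Bool → Bool → Bool → Bool × Bool × Bool
  | [], _, lv, he, rep => (lv, he, rep)
  | r :: rs, i, lv, he, rep =>
      bLoop firstLen fs check rs (i + 1)
        (if r.length ≠ firstLen then true else lv)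
        (if r.any cellEmpty then true else he)
        (if check && decide (5 ≤ i) && (pyReprRow r == fs) then true else rep)

def detect_table_signals_alt (table : List (String × List (List (Option String)))) : List (String × Bool) :=
  let rows := PySem.Dict.getD (PySem.Dict.mk table) "rows" []
  match rows with
  | [] => []
  | r0 :: rs =>
    let firstLen := r0.length
    let firstStr := pyReprRow r0
    let check := decide ((r0 :: rs).length > 5)
    let (lv, he, rep) := bLoop firstLen firstStr check (r0 :: rs) 0 false false false
    [("possible_header_row", true),
     ("repeated_header_detected", rep),
     ("merged_cells_likely", he),
     ("row_length_variance", lv)]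

-- ===== PRECONDITION & SPEC =====
def Spec_detect_table_signals (table : List (String × List (List (Option String)))) (out : List (String × Bool)) : Prop := out = detect_table_signals_alt table
instance (table : List (String × List (List (Option String)))) (out : List (String × Bool)) : Decidable (Spec_detect_table_signals table out) := by unfold Spec_detect_table_signals; infer_instance

-- ===== CLAIM (what is proved, stated in full; the proofs are below) =====
def Claim_equal_detect_table_signals : Prop := ∀ (table : List (String × List (List (Option String)))), Dom_detect_table_signals table → Spec_detect_table_signals table (detect_table_signals table)

-- ===== LEMMAS AND PROOFS =====

-- B's fused loop, characterised: each flag is its seed OR-ed with the pass it replaces;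
-- the rows with global index ≥ 5 are `drop (5 - i)` of the suffix starting at index i.
theorem bLoop_spec (L : Nat) (fs : List Char) (ch : Bool) :
    ∀ (rs : List (List (Option String))) (i : Nat) (lv he rep : Bool),
      bLoop L fs ch rs i lv he rep =
        (lv || rs.any (fun r => decide (r.length ≠ L)),
         he || rs.any (fun r => r.any cellEmpty),
         rep || (ch && (rs.drop (5 - i)).any (fun r => pyReprRow r == fs))) := by
  intro rs
  induction rs with
  | nil => intro i lv he rep; simp [bLoop]
  | cons r rs ih =>
    intro i lv he rep
    rw [bLoop, ih]
    by_cases h : 5 ≤ i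
    · have h0 : 5 - i = 0 := Nat.sub_eq_zero_of_le h
      have h1 : 5 - (i + 1) = 0 := Nat.sub_eq_zero_of_le (by omega)
      simp only [h0, h1, List.drop_zero, List.any_cons, h, decide_true, Prod.mk.injEq]
      refine ⟨?_, ?_, ?_⟩
      · by_cases hL : r.length ≠ L
        · simp [hL]
        · simp [hL]
      · cases r.any cellEmpty <;> simp
      · cases ch <;> cases rep <;> cases (pyReprRow r == fs) <;> simp
    · have h1 : 5 - i = (5 - (i + 1)) + 1 := by omega
      have hd : (r :: rs).drop (5 - i) = rs.drop (5 - (i + 1)) := by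
        rw [h1]; rfl
      simp only [hd, List.any_cons, h, decide_false, Prod.mk.injEq]
      refine ⟨?_, ?_, ?_⟩
      · by_cases hL : r.length ≠ L
        · simp [hL]
        · simp [hL]
      · cases r.any cellEmpty <;> simp
      · simp

-- A's break-loop is `any`
theorem aFindRepeated_eq_any (fs : List Char) :
    ∀ rs : List (List (Option String)),
      aFindRepeated fs rs = rs.any (fun r => pyReprRow r == fs) := by
  intro rs
  induction rs with
  | nil => rfl
  | cons r rs ih =>
    rw [aFindRepeated, List.any_cons]
    by_cases h : pyReprRow r == fs
    · simp [h]
    · simp only [Bool.not_eq_true] at h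
      simp [h, ih]

-- `len(set(lengths)) > 1` means some element differs from the first
theorem ofList_len_gt_one {α : Type} [BEq α] [LawfulBEq α] (x : α) (xs : List α) :
    decide ((PySem.Set.ofList (x :: xs)).length > 1) = xs.any (fun y => y != x) := by
  by_cases h : ∃ y ∈ xs, y ≠ x
  · obtain ⟨y, hy, hyx⟩ := h
    have hx : x ∈ PySem.Set.ofList (x :: xs) := by
      rw [PySem.Set.mem_ofList]; exact List.mem_cons_self
    have hy' : y ∈ PySem.Set.ofList (x :: xs) := by
      rw [PySem.Set.mem_ofList]; exact List.mem_cons_of_mem _ hy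
    have hlen : 1 < (PySem.Set.ofList (x :: xs)).length := by
      rcases hs : PySem.Set.ofList (x :: xs) with _ | ⟨a, _ | ⟨b, t⟩⟩
      · rw [hs] at hx; simp at hx
      · rw [hs] at hx hy'
        simp only [List.mem_singleton] at hx hy'
        exact absurd (hy'.trans hx.symm) hyx
      · simp
    have hany : xs.any (fun y => y != x) = true := by
      rw [List.any_eq_true]; exact ⟨y, hy, by simp [hyx]⟩
    simp [hlen, hany]
  · push Not at h
    have hall : ∀ y ∈ x :: xs, y = x := by
      intro y hy
      rcases List.mem_cons.mp hy with h1 | h1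
      · exact h1
      · exact h y h1
    have hnd : (PySem.Set.ofList (x :: xs)).Nodup := PySem.Set.nodup_ofList _
    have hx : x ∈ PySem.Set.ofList (x :: xs) := by
      rw [PySem.Set.mem_ofList]; exact List.mem_cons_self
    have hlen : ¬ 1 < (PySem.Set.ofList (x :: xs)).length := by
      rcases hs : PySem.Set.ofList (x :: xs) with _ | ⟨a, _ | ⟨b, t⟩⟩
      · simp
      · simp
      · exfalso
        have ha : a ∈ PySem.Set.ofList (x :: xs) := by rw [hs]; simp
        have hb : b ∈ PySem.Set.ofList (x :: xs) := by rw [hs]; simp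
        rw [PySem.Set.mem_ofList] at ha hb
        have : a = b := (hall a ha).trans (hall b hb).symm
        rw [hs] at hnd
        exact (List.nodup_cons.mp hnd).1 (this ▸ List.mem_cons_self)
    have hany : xs.any (fun y => y != x) = false := by
      rw [List.any_eq_false]; intro y hy; simp [h y hy]
    simp [hlen, hany]
  
-- ===== VERDICT (by name: the statement is the Claim_ definition above) =====
theorem detect_table_signals_spec : Claim_equal_detect_table_signals := by
  intro table _dom
  unfold Spec_detect_table_signals detect_table_signals detect_table_signals_alt
  cases hrows : PySem.Dict.getD (PySem.Dict.mk table) "rows" [] with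
  | nil => rfl
  | cons r0 rs =>
    simp only [bLoop_spec, Bool.false_or]
    have hrep :
        (if (r0 :: rs).length > 5 then aFindRepeated (pyReprRow r0) ((r0 :: rs).drop 5) else false) =
        (decide ((r0 :: rs).length > 5) &&
          (((r0 :: rs).drop (5 - 0)).any (fun r => pyReprRow r == pyReprRow r0))) := by
      rw [aFindRepeated_eq_any]
      by_cases h : (r0 :: rs).length > 5
      · rw [if_pos h, decide_eq_true h, Bool.true_and]
      · rw [if_neg h, decide_eq_false h, Bool.false_and]
    have hlen :
        decide ((PySem.Set.ofList ((r0 :: rs).map (fun r => (r.length : Int)))).length > 1) =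
        (r0 :: rs).any (fun r => decide (r.length ≠ r0.length)) := by
      rw [List.map_cons, ofList_len_gt_one, List.any_cons]
      have : (decide (r0.length ≠ r0.length)) = false := by simp
      rw [this, Bool.false_or, List.any_map]
      congr 1
      funext r
      by_cases hr : r.length = r0.length <;> simp [Function.comp, bne, hr]
    rw [hrep, hlen]
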